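-- pv_equiv track=rewrite | github.com/lescurej/BitPaper | bitpaper/simple_interleaved_core.py | _simple_deinterleave
-- ===== SOURCE A (Python) =====
-- def _simple_deinterleave(bitstream):
--     """Simple deinterleaving using the same pattern"""
--     if len(bitstream) <= 1:
--         return bitstream
--
--     # Calculate how many bits in each group
--     total_bits = len(bitstream)
--     group_size = total_bits // 3
--     remainder = total_bits % 3
--
--     # Reconstruct original order
--     original = [''] * len(bitstream)
--
--     # First group (every 3rd bit starting from 0)
--     for i in range(group_size + (1 if remainder > 0 else 0)):
--         if i < len(bitstream):
--             original[i * 3] = bitstream[i]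
--
--     # Second group (every 3rd bit starting from 1)
--     start_idx = group_size + (1 if remainder > 0 else 0)
--     for i in range(group_size + (1 if remainder > 1 else 0)):
--         if start_idx + i < len(bitstream) and i * 3 + 1 < len(bitstream):
--             original[i * 3 + 1] = bitstream[start_idx + i]
--
--     # Third group (every 3rd bit starting from 2)
--     start_idx = start_idx + group_size + (1 if remainder > 1 else 0)
--     for i in range(group_size):
--         if start_idx + i < len(bitstream) and i * 3 + 2 < len(bitstream):
--             original[i * 3 + 2] = bitstream[start_idx + i]
--
--     return ''.join(original)
-- ===== SOURCE B (Python) =====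
-- def _simple_deinterleave(bitstream):
--     """Deinterleave by slicing the stream into its three contiguous groups
--     and merging them round-robin, building the output left-to-right."""
--     if len(bitstream) <= 1:
--         return bitstream
--     n = len(bitstream)
--     a = n // 3 + (1 if n % 3 > 0 else 0)
--     b = n // 3 + (1 if n % 3 > 1 else 0)
--     groups = [bitstream[:a], bitstream[a:a + b], bitstream[a + b:]]
--     out = []
--     for i in range(a):
--         for g in groups:
--             if i < len(g):
--                 out.append(g[i])
--     return ''.join(out)
-- ===== Notes on version B (the rewrite author's own statement) =====
-- stated objective: simpler
-- what changed: A scatters the input into computed positions (i*3, i*3+1, i*3+2) of a preallocated array in three guarded passes with group_size/remainder offset arithmetic; B instead slices the stream into its three contiguous groups and merges them round-robin, reading the i-th character of each group per round and building the output left-to-right by appending.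
import Mathlib
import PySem

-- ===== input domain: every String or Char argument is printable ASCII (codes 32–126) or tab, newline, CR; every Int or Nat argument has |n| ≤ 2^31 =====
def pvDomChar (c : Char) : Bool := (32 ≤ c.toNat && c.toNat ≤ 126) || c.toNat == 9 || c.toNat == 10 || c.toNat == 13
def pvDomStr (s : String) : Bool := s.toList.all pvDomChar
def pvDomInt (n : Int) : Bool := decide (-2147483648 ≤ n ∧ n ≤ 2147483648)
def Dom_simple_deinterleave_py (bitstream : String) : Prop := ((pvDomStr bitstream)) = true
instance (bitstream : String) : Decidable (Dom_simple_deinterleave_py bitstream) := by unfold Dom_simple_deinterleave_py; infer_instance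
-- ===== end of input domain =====

-- B replaces A's scatter of the input into computed positions of a preallocated array by
-- slicing the stream into its three contiguous groups and merging them round-robin,
-- building the output left-to-right; objective: simpler.


-- ===== PORT A =====
-- literal transliteration of _simple_deinterleave; `bitstream[i]` appears only under a
-- guard making the nonnegative index in range, so `cs.getD i ' '` is exact there.
def simple_deinterleave_py (bitstream : String) : String :=
  let cs := bitstream.toList
  if cs.length ≤ 1 then bitstream
  else
    let total_bits := cs.length
    let group_size := total_bits / 3
    let remainder := total_bits % 3
    let original : List String := List.replicate cs.length ""
    let original := (List.range (group_size + (if remainder > 0 then 1 else 0))).foldl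
      (fun o i => if i < cs.length then o.set (i * 3) (String.ofList [cs.getD i ' ']) else o)
      original
    let start_idx := group_size + (if remainder > 0 then 1 else 0)
    let original := (List.range (group_size + (if remainder > 1 then 1 else 0))).foldl
      (fun o i => if start_idx + i < cs.length ∧ i * 3 + 1 < cs.length
        then o.set (i * 3 + 1) (String.ofList [cs.getD (start_idx + i) ' ']) else o)
      original
    let start_idx := start_idx + group_size + (if remainder > 1 then 1 else 0)
    let original := (List.range group_size).foldl
      (fun o i => if start_idx + i < cs.length ∧ i * 3 + 2 < cs.length
        then o.set (i * 3 + 2) (String.ofList [cs.getD (start_idx + i) ' ']) else o)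
      original
    PySem.Str.join "" original

-- ===== PORT B =====
-- transliteration of Source B: slice the stream into its three contiguous groups
-- (the slices bitstream[:a], bitstream[a:a+b], bitstream[a+b:] have nonnegative in-range
-- bounds, where take/drop is exact — PySem.List.slice_natCast), then merge the groups
-- round-robin; `g[i]` appears only under the guard `i < len(g)`, so `g.getD i ' '` is exact.
def simple_deinterleave_py_alt (bitstream : String) : String :=
  let cs := bitstream.toList
  if cs.length ≤ 1 then bitstream
  else
    let n := cs.length
    let a := n / 3 + (if n % 3 > 0 then 1 else 0)
    let b := n / 3 + (if n % 3 > 1 then 1 else 0)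
    let groups : List (List Char) := [cs.take a, (cs.drop a).take b, cs.drop (a + b)]
    let out : List Char := (List.range a).foldl
      (fun out i => groups.foldl
        (fun out g => if i < g.length then out ++ [g.getD i ' '] else out) out) []
    String.ofList out

-- ===== PRECONDITION & SPEC =====
def Spec_simple_deinterleave_py (bitstream : String) (out : String) : Prop := out = simple_deinterleave_py_alt bitstream
instance (bitstream : String) (out : String) : Decidable (Spec_simple_deinterleave_py bitstream out) := by unfold Spec_simple_deinterleave_py; infer_instance

-- ===== CLAIM (what is proved, stated in full; the proofs are below) =====
def Claim_equal_simple_deinterleave_py : Prop := ∀ (bitstream : String), Dom_simple_deinterleave_py bitstream → Spec_simple_deinterleave_py bitstream (simple_deinterleave_py bitstream)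

-- ===== LEMMAS AND PROOFS =====

-- the character both programs put at output position p
def pvF (cs : List Char) (g0 g1 : Nat) (p : Nat) : Char :=
  if p % 3 = 0 then cs.getD (p / 3) ' '
  else if p % 3 = 1 then cs.getD (g0 + p / 3) ' '
  else cs.getD (g0 + g1 + p / 3) ' '

-- the chunk of output B emits in round i
def pvRound (cs : List Char) (g0 g1 : Nat) (i : Nat) : List Char :=
  (if i < g0 then [cs.getD i ' '] else []) ++
  ((if i < g1 then [cs.getD (g0 + i) ' '] else []) ++
   (if i < cs.length / 3 then [cs.getD (g0 + g1 + i) ' '] else []))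

-- a fold of `set`s preserves the length
lemma pv_len_foldl_set {α : Type} (l : List Nat) (v : Nat → α) (idx : Nat → Nat)
    (o : List α) :
    (l.foldl (fun o i => o.set (idx i) (v i)) o).length = o.length := by
  induction l generalizing o with
  | nil => rfl
  | cons x xs ih => simp [List.foldl, ih]

-- getElem? after one scatter phase: positions ≡ r (mod 3) below 3*g are overwritten
lemma pv_get?_foldl_set {α : Type} (o : List α) (v : Nat → α) (r g p : Nat)
    (hr : r < 3) :
    ((List.range g).foldl (fun o i => o.set (i * 3 + r) (v i)) o)[p]? =
    if p % 3 = r ∧ p / 3 < g ∧ p < o.length then some (v (p / 3)) else o[p]? := by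
  induction g with
  | zero => simp
  | succ g ih =>
    rw [List.range_succ, List.foldl_append, List.foldl_cons, List.foldl_nil,
      List.getElem?_set]
    have hlen := pv_len_foldl_set (List.range g) v (fun i => i * 3 + r) o
    by_cases h : g * 3 + r = p
    · have h1 : p % 3 = r := by omega
      have h2 : p / 3 = g := by omega
      rw [if_pos h, hlen]
      split_ifs with h3 h4
      · rw [h2]
      · omega
      · omega
      · exact (List.getElem?_eq_none (by omega)).symm
    · rw [if_neg h, ih]
      by_cases hc : p % 3 = r ∧ p / 3 < g ∧ p < o.length
      · rw [if_pos hc, if_pos ⟨hc.1, by omega, hc.2.2⟩]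
      · rw [if_neg hc, if_neg (by rintro ⟨a1, a2, a3⟩; exact hc ⟨a1, by omega, a3⟩)]

-- B's inner loop over the three groups appends exactly pvRound i
lemma pv_inner (cs : List Char) (g0 g1 : Nat)
    (hg0 : g0 = (cs.length + 2) / 3) (hg1 : g1 = (cs.length + 1) / 3)
    (h2 : 2 ≤ cs.length) (out : List Char) (i : Nat) :
    ([cs.take g0, (cs.drop g0).take g1, cs.drop (g0 + g1)]).foldl
        (fun out g => if i < g.length then out ++ [g.getD i ' '] else out) out
      = out ++ pvRound cs g0 g1 i := by
  have hlen0 : (cs.take g0).length = g0 := by simp; omega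
  have hlen1 : ((cs.drop g0).take g1).length = g1 := by simp; omega
  have hlen2 : (cs.drop (g0 + g1)).length = cs.length / 3 := by simp; omega
  simp only [List.foldl_cons, List.foldl_nil, hlen0, hlen1, hlen2]
  unfold pvRound
  split_ifs <;>
    simp_all [List.getD_eq_getElem?_getD, List.append_assoc] <;>
    (repeat' apply And.intro) <;>
    (rw [List.getElem?_eq_getElem (by omega)]; simp)

-- merging the three groups round-robin emits pvF at positions 0, 1, 2, …
lemma pv_interleave (cs : List Char) (g0 g1 : Nat)
    (hg0 : g0 = (cs.length + 2) / 3) (hg1 : g1 = (cs.length + 1) / 3)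
    (m : Nat) (hm : m ≤ g0) :
    (List.range m).flatMap (pvRound cs g0 g1)
      = (List.range (min cs.length (3 * m))).map (pvF cs g0 g1) := by
  induction m with
  | zero => simp
  | succ m ih =>
    have hmn : 3 * m < cs.length := by omega
    rw [List.range_succ, List.flatMap_append, ih (by omega)]
    have hmin : min cs.length (3 * m) = 3 * m := by omega
    have hd : min cs.length (3 * (m + 1)) = 3 * m + min (cs.length - 3 * m) 3 := by omega
    rw [hmin, hd, List.range_add, List.map_append]
    congr 1
    · simp only [List.flatMap_cons, List.flatMap_nil, List.append_nil]
      have hd3 : min (cs.length - 3 * m) 3 = 1 ∨ min (cs.length - 3 * m) 3 = 2 ∨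
          min (cs.length - 3 * m) 3 = 3 := by omega
      have em0 : (3 * m) % 3 = 0 := by omega
      have ed0 : (3 * m) / 3 = m := by omega
      have em1 : (3 * m + 1) % 3 = 1 := by omega
      have ed1 : (3 * m + 1) / 3 = m := by omega
      have em2 : (3 * m + 2) % 3 = 2 := by omega
      have ed2 : (3 * m + 2) / 3 = m := by omega
      have c1 : m < g0 := by omega
      rcases hd3 with h | h | h <;> rw [h]
      · have c2 : ¬ m < g1 := by omega
        have c3 : ¬ m < cs.length / 3 := by omega
        simp [pvRound, pvF, c1, c2, c3, List.range_succ, em0, ed0]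
      · have c2 : m < g1 := by omega
        have c3 : ¬ m < cs.length / 3 := by omega
        simp [pvRound, pvF, c1, c2, c3, List.range_succ, em0, ed0, em1, ed1]
      · have c2 : m < g1 := by omega
        have c3 : m < cs.length / 3 := by omega
        simp [pvRound, pvF, c1, c2, c3, List.range_succ, em0, ed0, em1, ed1, em2, ed2]

theorem simple_deinterleave_py_spec_aux (bitstream : String) :
    simple_deinterleave_py bitstream = simple_deinterleave_py_alt bitstream := by
  unfold simple_deinterleave_py simple_deinterleave_py_alt
  set cs := bitstream.toList with hcs
  by_cases hn : cs.length ≤ 1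
  · simp [hn]
  · simp only [if_neg hn]
    set n := cs.length with hnn
    have h2 : 2 ≤ n := by omega
    have hg0eq : n / 3 + (if n % 3 > 0 then 1 else 0) = (n + 2) / 3 := by
      split_ifs <;> omega
    have hg1eq : n / 3 + (if n % 3 > 1 then 1 else 0) = (n + 1) / 3 := by
      split_ifs <;> omega
    rw [hg0eq, hg1eq]
    set g0 := (n + 2) / 3 with hg0
    set g1 := (n + 1) / 3 with hg1
    -- A side: the guards always hold; normalize the scatter indices
    have step1 : ∀ (o : List String) (i : Nat), i ∈ List.range g0 →
        (if i < n then o.set (i * 3) (String.ofList [cs.getD i ' ']) else o)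
          = o.set (i * 3 + 0) (String.ofList [cs.getD i ' ']) := by
      intro o i hi
      rw [List.mem_range] at hi
      rw [if_pos (by omega), Nat.add_zero]
    have step2 : ∀ (o : List String) (i : Nat), i ∈ List.range g1 →
        (if g0 + i < n ∧ i * 3 + 1 < n
          then o.set (i * 3 + 1) (String.ofList [cs.getD (g0 + i) ' ']) else o)
          = o.set (i * 3 + 1) (String.ofList [cs.getD (g0 + i) ' ']) := by
      intro o i hi
      rw [List.mem_range] at hi
      rw [if_pos (by omega)]
    have step3 : ∀ (o : List String) (i : Nat), i ∈ List.range (n / 3) →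
        (if g0 + n / 3 + (if n % 3 > 1 then 1 else 0) + i < n ∧ i * 3 + 2 < n
          then o.set (i * 3 + 2)
            (String.ofList [cs.getD (g0 + n / 3 + (if n % 3 > 1 then 1 else 0) + i) ' '])
          else o)
          = o.set (i * 3 + 2) (String.ofList [cs.getD (g0 + g1 + i) ' ']) := by
      intro o i hi
      rw [List.mem_range] at hi
      have hidx : g0 + n / 3 + (if n % 3 > 1 then 1 else 0) + i = g0 + g1 + i := by
        rw [hg1]; split_ifs <;> omega
      rw [hidx, if_pos (by omega)]
    rw [PySem.List.foldl_congr_mem _ _ _ _ step1,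
      PySem.List.foldl_congr_mem _ _ _ _ step2,
      PySem.List.foldl_congr_mem _ _ _ _ step3]
    -- A's scattered array, read off position by position, is pvF
    have hA : (List.range (n / 3)).foldl
        (fun o i => o.set (i * 3 + 2) (String.ofList [cs.getD (g0 + g1 + i) ' ']))
        ((List.range g1).foldl
          (fun o i => o.set (i * 3 + 1) (String.ofList [cs.getD (g0 + i) ' ']))
          ((List.range g0).foldl
            (fun o i => o.set (i * 3 + 0) (String.ofList [cs.getD i ' ']))
            (List.replicate n "")))
        = (List.range n).map (fun p => String.ofList [pvF cs g0 g1 p]) := by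
      apply List.ext_getElem?
      intro p
      rw [pv_get?_foldl_set _ _ 2 _ _ (by omega),
        pv_get?_foldl_set _ _ 1 _ _ (by omega),
        pv_get?_foldl_set _ _ 0 _ _ (by omega)]
      simp only [pv_len_foldl_set, List.length_replicate, List.getElem?_map]
      by_cases hpn : p < n
      · have hp : p % 3 = 0 ∨ p % 3 = 1 ∨ p % 3 = 2 := by omega
        rcases hp with h | h | h
        · rw [if_neg (by omega), if_neg (by omega), if_pos ⟨h, by omega, hpn⟩]
          simp [pvF, h, hpn]
        · rw [if_neg (by omega), if_pos ⟨h, by omega, hpn⟩]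
          simp [pvF, h, hpn]
        · rw [if_pos ⟨h, by omega, hpn⟩]
          simp [pvF, h, hpn]
      · rw [if_neg (by omega), if_neg (by omega), if_neg (by omega)]
        simp [hpn]
    rw [hA]
    -- B side: each round appends pvRound, so the output is pvF in order
    rw [PySem.List.foldl_congr_mem _ _ _ _
      (fun out i _ => pv_inner cs g0 g1 hg0 hg1 h2 out i)]
    rw [PySem.List.foldl_append_eq_flatMap, List.nil_append,
      pv_interleave cs g0 g1 hg0 hg1 g0 le_rfl]
    have hmin : min n (3 * g0) = n := by omega
    rw [hmin]
    -- join of singletons = ofList of the characters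
    rw [← String.toList_inj]
    simp only [pysem, List.map_map]
    rw [show ((fun s => s.toList) ∘ fun p => String.ofList [pvF cs g0 g1 p])
        = (fun c => [c]) ∘ pvF cs g0 g1 from funext fun p => by simp,
      ← List.map_map]
    rw [show ("".toList : List Char) = [] from rfl, PySem.Chars.join_nil_singletons]
    simp

-- ===== VERDICT (by name: the statement is the Claim_ definition above) =====
theorem simple_deinterleave_py_spec : Claim_equal_simple_deinterleave_py := by
  intro bitstream _
  exact simple_deinterleave_py_spec_aux bitstream
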